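-- pv_equiv track=rewrite | github.com/nachofarfan87/ailex-backend | legal_engine/strategy_engine.py | _categorize_age_buckets
-- ===== SOURCE A (Python) =====
-- def _categorize_age_buckets(edades: list[int]) -> list[str]:
--     buckets: list[str] = []
--     if any(edad < 18 for edad in edades):
--         buckets.append("menor_18")
--     if any(18 <= edad <= 21 for edad in edades):
--         buckets.append("entre_18_y_21")
--     if any(edad > 21 for edad in edades):
--         buckets.append("mayor_21")
--     return buckets
-- ===== SOURCE B (Python) =====
-- def _categorize_age_buckets(edades: list[int]) -> list[str]:
--     has_minor = has_18_21 = has_over = False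
--     for edad in edades:
--         if edad < 18:
--             has_minor = True
--         elif edad <= 21:
--             has_18_21 = True
--         else:
--             has_over = True
--     result: list[str] = []
--     if has_minor:
--         result.append("menor_18")
--     if has_18_21:
--         result.append("entre_18_y_21")
--     if has_over:
--         result.append("mayor_21")
--     return result
-- ===== Notes on version B (the rewrite author's own statement) =====
-- stated objective: alternative
-- what changed: Replaces three separate any() scans over the list with a single pass maintaining three boolean flags (if/elif partition of the integers), then emits the bucket names from the flags.
import Mathlib
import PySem

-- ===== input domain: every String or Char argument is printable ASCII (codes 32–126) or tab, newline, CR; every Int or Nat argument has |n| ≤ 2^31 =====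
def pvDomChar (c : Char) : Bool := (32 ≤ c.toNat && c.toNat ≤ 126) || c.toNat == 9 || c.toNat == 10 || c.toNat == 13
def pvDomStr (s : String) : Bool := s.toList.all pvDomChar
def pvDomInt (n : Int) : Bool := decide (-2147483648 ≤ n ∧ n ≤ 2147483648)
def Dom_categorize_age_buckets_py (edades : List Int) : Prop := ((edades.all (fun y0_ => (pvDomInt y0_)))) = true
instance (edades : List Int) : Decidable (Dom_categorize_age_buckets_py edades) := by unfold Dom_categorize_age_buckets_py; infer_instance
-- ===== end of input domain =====

-- ===== PORT A =====
-- single-pass flags variant vs three any() scans; both transliterated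
def categorize_age_buckets_py (edades : List Int) : List String :=
  let buckets : List String := []
  let buckets := if edades.any (fun edad => decide (edad < 18)) then buckets ++ ["menor_18"] else buckets
  let buckets := if edades.any (fun edad => decide (18 ≤ edad ∧ edad ≤ 21)) then buckets ++ ["entre_18_y_21"] else buckets
  let buckets := if edades.any (fun edad => decide (21 < edad)) then buckets ++ ["mayor_21"] else buckets
  buckets

-- ===== PORT B =====
def categorize_age_buckets_py_alt (edades : List Int) : List String :=
  let flags := edades.foldl (fun (f : Bool × Bool × Bool) edad =>
      if edad < 18 then (true, f.2.1, f.2.2)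
      else if edad ≤ 21 then (f.1, true, f.2.2)
      else (f.1, f.2.1, true)) (false, false, false)
  let result : List String := []
  let result := if flags.1 then result ++ ["menor_18"] else result
  let result := if flags.2.1 then result ++ ["entre_18_y_21"] else result
  let result := if flags.2.2 then result ++ ["mayor_21"] else result
  result

-- ===== PRECONDITION & SPEC =====
def Spec_categorize_age_buckets_py (edades : List Int) (out : List String) : Prop := out = categorize_age_buckets_py_alt edades
instance (edades : List Int) (out : List String) : Decidable (Spec_categorize_age_buckets_py edades out) := by unfold Spec_categorize_age_buckets_py; infer_instance

-- ===== CLAIM (what is proved, stated in full; the proofs are below) =====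
def Claim_equal_categorize_age_buckets_py : Prop := ∀ (edades : List Int), Dom_categorize_age_buckets_py edades → Spec_categorize_age_buckets_py edades (categorize_age_buckets_py edades)

-- ===== LEMMAS AND PROOFS =====

-- ===== VERDICT (by name: the statement is the Claim_ definition above) =====
lemma flags_eq (edades : List Int) (f : Bool × Bool × Bool) :
    edades.foldl (fun (f : Bool × Bool × Bool) edad =>
      if edad < 18 then (true, f.2.1, f.2.2)
      else if edad ≤ 21 then (f.1, true, f.2.2)
      else (f.1, f.2.1, true)) f =
    (f.1 || edades.any (fun edad => decide (edad < 18)),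
     f.2.1 || edades.any (fun edad => decide (18 ≤ edad ∧ edad ≤ 21)),
     f.2.2 || edades.any (fun edad => decide (21 < edad))) := by
  induction edades generalizing f with
  | nil => simp
  | cons e rest ih =>
    simp only [List.foldl_cons, List.any_cons]
    rw [ih]
    rcases f with ⟨m, b, o⟩
    by_cases h1 : e < 18
    · simp [h1, show ¬(18 ≤ e ∧ e ≤ 21) by omega, show ¬(21 < e) by omega]
    · by_cases h2 : e ≤ 21
      · simp [h1, h2, show (18 ≤ e ∧ e ≤ 21) by omega, show ¬(21 < e) by omega]
      · simp [h1, h2, show (21 < e) by omega]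

theorem categorize_age_buckets_py_spec : Claim_equal_categorize_age_buckets_py := by
  intro edades _
  unfold Spec_categorize_age_buckets_py categorize_age_buckets_py categorize_age_buckets_py_alt
  rw [flags_eq]
  simp
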